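-- pv_equiv track=rewrite | github.com/robot-learning-freiburg/SPINO | panoptic_label_generator/datasets/dataset.py | _rm_classes_mapping
-- ===== SOURCE A (Python) =====
-- from typing import Any, Callable, Dict, List, Tuple
--
-- def _rm_classes_mapping(
--         remove_classes: List[int],
--         mapping_list: List[Tuple[int, int]]
-- ) -> List[Tuple[int, int]]:
--     sub_list = dict.fromkeys(mapping_list, 0)
--     for k_del in remove_classes:
--         for idx, elem in enumerate(mapping_list):
--             if elem[1] > k_del:
--                 sub_list[elem] += 1
--             elif elem[1] == k_del:
--                 del sub_list[elem]
--     adapted_list = [(k[0], (k[1] - v)) for k, v in sub_list.items()]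
--     return adapted_list
-- ===== SOURCE B (Python) =====
-- from typing import List, Tuple
--
--
-- def _bisect_left(a: List[int], x: int) -> int:
--     lo, hi = 0, len(a)
--     while lo < hi:
--         mid = (lo + hi) // 2
--         if a[mid] < x:
--             lo = mid + 1
--         else:
--             hi = mid
--     return lo
--
--
-- def _rm_classes_mapping(
--         remove_classes: List[int],
--         mapping_list: List[Tuple[int, int]]
-- ) -> List[Tuple[int, int]]:
--     removed = set(remove_classes)
--     srt = sorted(remove_classes)
--     seen = set()
--     adapted_list = []
--     for pair in mapping_list:
--         if pair in seen or pair[1] in removed: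
--             continue
--         seen.add(pair)
--         adapted_list.append((pair[0], pair[1] - _bisect_left(srt, pair[1])))
--     return adapted_list
-- ===== Notes on version B (the rewrite author's own statement) =====
-- stated objective: alternative
-- what changed: A rescans the whole mapping list once per removed class, mutating per-pair counters in a dict; B makes one pass over the mapping list, skipping removed and already-seen pairs, and subtracts from each surviving value the number of removed classes below it, found by a single binary search on the sorted remove list.
-- intended difference: On mapping lists that contain the same (class, id) pair twice with a removed class below its id, A's counters are incremented once per duplicate occurrence so it subtracts the shift multiplied by the pair's multiplicity (e.g. [(1,3)] on ([0],[(1,5),(1,5)])), while B subtracts the shift once ([(1,4)]), which is the intended remapped class index. — e.g. on _rm_classes_mapping([0], [(1, 5), (1, 5)]): A returns [(1, 3)], B returns [(1, 4)]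
import Mathlib
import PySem

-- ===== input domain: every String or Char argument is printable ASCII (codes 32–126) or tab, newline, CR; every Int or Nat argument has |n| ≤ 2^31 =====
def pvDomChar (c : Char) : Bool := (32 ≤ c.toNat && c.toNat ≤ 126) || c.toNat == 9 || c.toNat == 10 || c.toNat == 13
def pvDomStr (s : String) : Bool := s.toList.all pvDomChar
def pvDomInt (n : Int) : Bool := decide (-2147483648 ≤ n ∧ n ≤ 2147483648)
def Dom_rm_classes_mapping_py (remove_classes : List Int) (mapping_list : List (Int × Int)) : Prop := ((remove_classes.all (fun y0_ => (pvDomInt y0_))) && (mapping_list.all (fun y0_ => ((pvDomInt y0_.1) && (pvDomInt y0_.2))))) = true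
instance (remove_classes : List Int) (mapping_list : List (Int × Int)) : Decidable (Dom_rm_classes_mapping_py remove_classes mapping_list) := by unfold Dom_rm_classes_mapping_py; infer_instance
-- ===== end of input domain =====

-- B replaces A's pass over the whole mapping list per removed class by a single pass that
-- skips removed and already-seen pairs and binary-searches the sorted remove list; on
-- duplicated pairs the two differ (see D_ below); return value only, neither version
-- mutates its arguments.

-- ===== PORT A =====
-- one step of A's inner 'for idx, elem in enumerate(mapping_list)' loop; 'none' = a KeyError was raised
def pvA_inner (kdel : Int) (st : Option (PySem.Dict (Int × Int) Int)) (elem : Int × Int) :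
    Option (PySem.Dict (Int × Int) Int) :=
  match st with
  | none => none
  | some d =>
    if elem.2 > kdel then
      match d.get? elem with
      | none => none                          -- sub_list[elem] += 1 on a missing key: KeyError
      | some v => some (d.insert elem (v + 1))
    else if elem.2 = kdel then
      match d.get? elem with
      | none => none                          -- del sub_list[elem] on a missing key: KeyError
      | some _ => some (d.erase elem)
    else some d

def rm_classes_mapping_py (remove_classes : List Int) (mapping_list : List (Int × Int)) : List (Int × Int) :=
  -- sub_list = dict.fromkeys(mapping_list, 0)
  let sub_list : PySem.Dict (Int × Int) Int :=
    mapping_list.foldl (fun d p => d.insert p 0) PySem.Dict.empty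
  let fin := remove_classes.foldl (fun st k_del => mapping_list.foldl (pvA_inner k_del) st) (some sub_list)
  match fin with
  | none => []                                -- Python raises KeyError here (excluded by Pre_)
  | some d => d.items.map (fun kv => (kv.1.1, kv.1.2 - kv.2))

-- ===== PORT B =====
-- the while loop of Source B's _bisect_left helper (lo, hi as in the loop)
def pvBisectLoop (a : List Int) (x : Int) (lo hi : Nat) : Nat :=
  if _h : lo < hi then
    if a.getD ((lo + hi) / 2) 0 < x then pvBisectLoop a x ((lo + hi) / 2 + 1) hi
    else pvBisectLoop a x lo ((lo + hi) / 2)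
  else lo
termination_by hi - lo
decreasing_by all_goals omega

def rm_classes_mapping_py_alt (remove_classes : List Int) (mapping_list : List (Int × Int)) : List (Int × Int) :=
  let removed : PySem.Set Int := PySem.Set.ofList remove_classes
  let srt := PySem.List.sorted remove_classes (fun x => x) false
  -- for pair in mapping_list: skip if seen or removed, else record and append the shifted pair
  (mapping_list.foldl
    (fun (st : PySem.Set (Int × Int) × List (Int × Int)) pair =>
      if PySem.Set.contains st.1 pair || PySem.Set.contains removed pair.2 then st
      else (PySem.Set.add st.1 pair,
            st.2 ++ [(pair.1, pair.2 - (pvBisectLoop srt pair.2 0 srt.length : Int))]))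
    (PySem.Set.empty, [])).2

-- ===== PRECONDITION & SPEC =====
-- Pre_ excludes exactly the inputs on which A raises KeyError: a pair whose second component is a
-- removed class but is duplicated in mapping_list, or is followed in remove_classes (at or after
-- its own occurrence) by a not-larger removed class — in both cases A hits a deleted key again.
def Pre_rm_classes_mapping_py (remove_classes : List Int) (mapping_list : List (Int × Int)) : Prop :=
  ∀ p ∈ mapping_list, p.2 ∈ remove_classes →
    mapping_list.count p = 1 ∧ List.Pairwise (fun a b => a = p.2 → p.2 < b) remove_classes
instance (remove_classes : List Int) (mapping_list : List (Int × Int)) : Decidable (Pre_rm_classes_mapping_py remove_classes mapping_list) := by unfold Pre_rm_classes_mapping_py; infer_instance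

def pvWitness_rm_classes_mapping_py : List Int × (List (Int × Int)) :=
  ([1, 5], [(0, 0), (1, 1), (2, 7), (0, 0)])

-- On mapping lists containing the same pair twice with a removed class below its id, A subtracts
-- the shift once per duplicate occurrence (accidental: the duplicates share one dict counter),
-- e.g. [(1,3)] on ([0],[(1,5),(1,5)]); B subtracts it once ([(1,4)]), the intended class index.
def D_rm_classes_mapping_py (remove_classes : List Int) (mapping_list : List (Int × Int)) : Prop :=
  ∃ p ∈ mapping_list, 2 ≤ mapping_list.count p ∧ p.2 ∉ remove_classes ∧
    ∃ k ∈ remove_classes, k < p.2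
instance (remove_classes : List Int) (mapping_list : List (Int × Int)) : Decidable (D_rm_classes_mapping_py remove_classes mapping_list) := by unfold D_rm_classes_mapping_py; infer_instance

def Spec_rm_classes_mapping_py (remove_classes : List Int) (mapping_list : List (Int × Int)) (out : List (Int × Int)) : Prop := ¬ D_rm_classes_mapping_py remove_classes mapping_list → out = rm_classes_mapping_py_alt remove_classes mapping_list
instance (remove_classes : List Int) (mapping_list : List (Int × Int)) (out : List (Int × Int)) : Decidable (Spec_rm_classes_mapping_py remove_classes mapping_list out) := by unfold Spec_rm_classes_mapping_py; infer_instance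

def pvDiffWitness_rm_classes_mapping_py : List Int × (List (Int × Int)) :=
  ([0], [(1, 5), (1, 5)])

def pvDiffWitnessOut_rm_classes_mapping_py : (List (Int × Int)) × (List (Int × Int)) :=
  ([(1, 3)], [(1, 4)])

-- ===== CLAIM (what is proved, stated in full; the proofs are below) =====
def Claim_unchanged_rm_classes_mapping_py : Prop := ∀ (remove_classes : List Int) (mapping_list : List (Int × Int)), Dom_rm_classes_mapping_py remove_classes mapping_list → Pre_rm_classes_mapping_py remove_classes mapping_list → Spec_rm_classes_mapping_py remove_classes mapping_list (rm_classes_mapping_py remove_classes mapping_list)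
def Claim_changed_rm_classes_mapping_py : Prop := Dom_rm_classes_mapping_py (pvDiffWitness_rm_classes_mapping_py.1) (pvDiffWitness_rm_classes_mapping_py.2) ∧ Pre_rm_classes_mapping_py (pvDiffWitness_rm_classes_mapping_py.1) (pvDiffWitness_rm_classes_mapping_py.2) ∧ D_rm_classes_mapping_py (pvDiffWitness_rm_classes_mapping_py.1) (pvDiffWitness_rm_classes_mapping_py.2) ∧ rm_classes_mapping_py (pvDiffWitness_rm_classes_mapping_py.1) (pvDiffWitness_rm_classes_mapping_py.2) = pvDiffWitnessOut_rm_classes_mapping_py.1 ∧ rm_classes_mapping_py_alt (pvDiffWitness_rm_classes_mapping_py.1) (pvDiffWitness_rm_classes_mapping_py.2) = pvDiffWitnessOut_rm_classes_mapping_py.2 ∧ pvDiffWitnessOut_rm_classes_mapping_py.1 ≠ pvDiffWitnessOut_rm_classes_mapping_py.2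
def Claim_exact_rm_classes_mapping_py : Prop := ∀ (remove_classes : List Int) (mapping_list : List (Int × Int)), Dom_rm_classes_mapping_py remove_classes mapping_list → Pre_rm_classes_mapping_py remove_classes mapping_list → D_rm_classes_mapping_py remove_classes mapping_list → rm_classes_mapping_py remove_classes mapping_list ≠ rm_classes_mapping_py_alt remove_classes mapping_list

-- ===== LEMMAS AND PROOFS =====

-- dict.erase: lookup and key-list characterisations (erase filters the items list)
theorem pv_get?_erase (d : PySem.Dict (Int × Int) Int) (k q : Int × Int) :
    (d.erase k).get? q = if q = k then none else d.get? q := by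
  obtain ⟨items⟩ := d
  induction items with
  | nil => simp [PySem.Dict.erase, PySem.Dict.get?]
  | cons a rest ih =>
    by_cases hak : a.1 = k <;> by_cases haq : a.1 = q <;>
      simp_all [PySem.Dict.erase, PySem.Dict.get?, beq_iff_eq]


theorem pv_keys_erase (d : PySem.Dict (Int × Int) Int) (k : Int × Int) :
    (d.erase k).keys = d.keys.filter (fun p => !(p == k)) := by
  obtain ⟨items⟩ := d
  simp [PySem.Dict.erase, PySem.Dict.keys, List.filter_map]
  congr 1


-- dict.fromkeys(mapping_list, 0): every listed key maps to 0
theorem pv_get?_fromkeys (l : List (Int × Int)) (d : PySem.Dict (Int × Int) Int) (q : Int × Int) :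
    (l.foldl (fun d p => d.insert p 0) d).get? q = if q ∈ l then some 0 else d.get? q := by
  induction l generalizing d with
  | nil => simp
  | cons p rest ih =>
    simp only [List.foldl_cons, ih, PySem.Dict.get?_insert, List.mem_cons]
    by_cases hq : q ∈ rest <;> by_cases hqp : q = p <;> simp [hq, hqp]


theorem pv_contains_of_get? (d : PySem.Dict (Int × Int) Int) (k : Int × Int) {v : Int}
    (h : d.get? k = some v) : d.contains k = true := by
  rw [PySem.Dict.contains_eq_isSome_get?, h]; rfl

theorem pv_not_contains_of_get? (d : PySem.Dict (Int × Int) Int) (k : Int × Int)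
    (h : d.get? k = none) : d.contains k = false := by
  rw [PySem.Dict.contains_eq_isSome_get?, h]; rfl

-- one full inner pass of A (one k_del over all of mapping_list), characterised
theorem pv_inner_pass (kdel : Int) (sub : List (Int × Int)) :
    ∀ (d : PySem.Dict (Int × Int) Int),
    d.keys.Nodup →
    (∀ p ∈ sub, d.contains p = true → p.2 = kdel → sub.count p = 1) →
    (∀ p ∈ sub, d.contains p = false → ¬ (kdel < p.2) ∧ p.2 ≠ kdel) →
    ∃ d' : PySem.Dict (Int × Int) Int,
      sub.foldl (pvA_inner kdel) (some d) = some d' ∧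
      d'.keys = d.keys.filter (fun p => !(decide (p ∈ sub) && decide (p.2 = kdel))) ∧
      ∀ q, d'.get? q =
        if q ∈ sub ∧ q.2 = kdel then none
        else if q ∈ sub ∧ kdel < q.2 then (d.get? q).map (· + (sub.count q : Int))
        else d.get? q := by
  induction sub with
  | nil =>
    intro d hnd _ _
    exact ⟨d, rfl, by simp, by simp⟩
  | cons e rest ih =>
    intro d hnd h1 h2
    by_cases hgt : kdel < e.2
    · -- increment branch
      cases hge : d.get? e with
      | none =>
        exact absurd hgt ((h2 e (by simp) (pv_not_contains_of_get? d e hge)).1)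
      | some v =>
        have hconte : d.contains e = true := pv_contains_of_get? d e hge
        have hkeys1 : (d.insert e (v + 1)).keys = d.keys :=
          PySem.Dict.keys_insert_of_contains d (v + 1) hconte
        have hnd1 : (d.insert e (v + 1)).keys.Nodup := by rw [hkeys1]; exact hnd
        have h1' : ∀ p ∈ rest, (d.insert e (v + 1)).contains p = true → p.2 = kdel →
            rest.count p = 1 := by
          intro p hp hc hpk
          have hpe : p ≠ e := by
            rintro rfl; exact absurd hpk (by omega)
          have hcd : d.contains p = true := by
            rw [PySem.Dict.contains_insert] at hc
            simpa [beq_iff_eq, hpe] using hc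
          have := h1 p (by simp [hp]) hcd hpk
          simpa [List.count_cons, Ne.symm hpe] using this
        have h2' : ∀ p ∈ rest, (d.insert e (v + 1)).contains p = false →
            ¬ (kdel < p.2) ∧ p.2 ≠ kdel := by
          intro p hp hc
          rw [PySem.Dict.contains_insert] at hc
          exact h2 p (by simp [hp]) (by simpa using (Bool.or_eq_false_iff.mp hc).2)
        obtain ⟨d', hfold, hkeys, hget⟩ := ih (d.insert e (v + 1)) hnd1 h1' h2'
        refine ⟨d', ?_, ?_, ?_⟩
        · simpa [pvA_inner, hgt, hge] using hfold
        · rw [hkeys, hkeys1]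
          apply List.filter_congr
          intro p hp
          by_cases hpk : p.2 = kdel
          · have hpe : p ≠ e := by rintro rfl; exact absurd hpk (by omega)
            simp [hpk, hpe]
          · simp [hpk]
        · intro q
          rw [hget q]
          have hd1q : (d.insert e (v + 1)).get? q = if q = e then some (v + 1) else d.get? q :=
            PySem.Dict.get?_insert d e q (v + 1)
          by_cases hqe : q = e
          · subst hqe
            have hqk : ¬ q.2 = kdel := by omega
            by_cases hqr : q ∈ rest
            · simp [hqk, hgt, hqr, hd1q, hge, List.count_cons_self]
              ring
            · simp [hqk, hgt, hqr, hd1q, hge, List.count_cons_self, List.count_eq_zero.mpr hqr]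
          · have hmem : (q ∈ e :: rest) ↔ q ∈ rest := by simp [hqe]
            have hcnt : (e :: rest).count q = rest.count q := by simp [Ne.symm hqe]
            rw [hd1q, if_neg hqe]
            simp only [hmem, hcnt]
    · by_cases heq : e.2 = kdel
      · -- delete branch
        cases hge : d.get? e with
        | none =>
          exact absurd heq (h2 e (by simp) (pv_not_contains_of_get? d e hge)).2
        | some v =>
          have hconte : d.contains e = true := pv_contains_of_get? d e hge
          have hcount1 : (e :: rest).count e = 1 := h1 e (by simp) hconte heq
          have henr : e ∉ rest := by
            rw [List.count_cons_self] at hcount1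
            exact List.count_eq_zero.mp (by omega)
          have hg1 : ∀ q, (d.erase e).get? q = if q = e then none else d.get? q :=
            pv_get?_erase d e
          have hk1 : (d.erase e).keys = d.keys.filter (fun p => !(p == e)) :=
            pv_keys_erase d e
          have hnd1 : (d.erase e).keys.Nodup := by rw [hk1]; exact hnd.filter _
          have h1' : ∀ p ∈ rest, (d.erase e).contains p = true → p.2 = kdel →
              rest.count p = 1 := by
            intro p hp hc hpk
            by_cases hpe : p = e
            · exact absurd (hpe ▸ hp) henr
            · have hcd : d.contains p = true := by
                rw [PySem.Dict.contains_eq_isSome_get?] at hc ⊢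
                rwa [hg1 p, if_neg hpe] at hc
              have := h1 p (by simp [hp]) hcd hpk
              simpa [List.count_cons, Ne.symm hpe] using this
          have h2' : ∀ p ∈ rest, (d.erase e).contains p = false →
              ¬ (kdel < p.2) ∧ p.2 ≠ kdel := by
            intro p hp hc
            by_cases hpe : p = e
            · exact absurd (hpe ▸ hp) henr
            · have hcd : d.contains p = false := by
                rw [PySem.Dict.contains_eq_isSome_get?] at hc ⊢
                rwa [hg1 p, if_neg hpe] at hc
              exact h2 p (by simp [hp]) hcd
          obtain ⟨d', hfold, hkeys, hget⟩ := ih (d.erase e) hnd1 h1' h2'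
          refine ⟨d', ?_, ?_, ?_⟩
          · simpa [pvA_inner, hgt, heq, hge] using hfold
          · rw [hkeys, hk1, List.filter_filter]
            apply List.filter_congr
            intro p hp
            by_cases hpe : p = e
            · subst hpe; simp [heq]
            · simp [hpe]
          · intro q
            rw [hget q, hg1 q]
            by_cases hqe : q = e
            · subst hqe
              simp [heq, henr]
            · have hmem : (q ∈ e :: rest) ↔ q ∈ rest := by simp [hqe]
              have hcnt : (e :: rest).count q = rest.count q := by simp [Ne.symm hqe]
              rw [if_neg hqe]
              simp only [hmem, hcnt]
      · -- skip branch
        have h1' : ∀ p ∈ rest, d.contains p = true → p.2 = kdel → rest.count p = 1 := by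
          intro p hp hc hpk
          have hpe : p ≠ e := by rintro rfl; exact heq hpk
          have := h1 p (by simp [hp]) hc hpk
          simpa [List.count_cons, Ne.symm hpe] using this
        have h2' : ∀ p ∈ rest, d.contains p = false → ¬ (kdel < p.2) ∧ p.2 ≠ kdel :=
          fun p hp hc => h2 p (by simp [hp]) hc
        obtain ⟨d', hfold, hkeys, hget⟩ := ih d hnd h1' h2'
        refine ⟨d', ?_, ?_, ?_⟩
        · simpa [pvA_inner, hgt, heq] using hfold
        · rw [hkeys]
          apply List.filter_congr
          intro p hp
          by_cases hpe : p = e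
          · subst hpe; simp [heq]
          · simp [hpe]
        · intro q
          rw [hget q]
          by_cases hqe : q = e
          · subst hqe
            simp [heq, hgt]
          · have hmem : (q ∈ e :: rest) ↔ q ∈ rest := by simp [hqe]
            have hcnt : (e :: rest).count q = rest.count q := by simp [Ne.symm hqe]
            simp only [hmem, hcnt]


-- the outer loop of A, with its invariant over the processed prefix rs of remove_classes
theorem pv_outer (ml : List (Int × Int)) (rcs : List Int)
    (hpre : Pre_rm_classes_mapping_py rcs ml) :
    ∀ (todo rs : List Int) (d : PySem.Dict (Int × Int) Int), rcs = rs ++ todo →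
      d.keys = (PySem.Set.ofList ml).filter (fun p => !decide (p.2 ∈ rs)) →
      (∀ q, d.get? q = if q ∈ ml ∧ q.2 ∉ rs
        then some ((ml.count q : Int) * (rs.countP (fun k => decide (k < q.2)) : Int))
        else none) →
      ∃ dF : PySem.Dict (Int × Int) Int,
        todo.foldl (fun st k => ml.foldl (pvA_inner k) st) (some d) = some dF ∧
        dF.keys = (PySem.Set.ofList ml).filter (fun p => !decide (p.2 ∈ rcs)) ∧
        ∀ q, dF.get? q = if q ∈ ml ∧ q.2 ∉ rcs
          then some ((ml.count q : Int) * (rcs.countP (fun k => decide (k < q.2)) : Int))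
          else none := by
  intro todo
  induction todo with
  | nil =>
    intro rs d hcat hk hg
    have hrs : rs = rcs := by simpa using hcat.symm
    subst hrs
    exact ⟨d, rfl, hk, hg⟩
  | cons kdel todo' ih =>
    intro rs d hcat hk hg
    have hkin : kdel ∈ rcs := by rw [hcat]; simp
    have hnd : d.keys.Nodup := by
      rw [hk]; exact (PySem.Set.nodup_ofList ml).filter _
    have hmemkeys : ∀ p, p ∈ d.keys ↔ (p ∈ ml ∧ p.2 ∉ rs) := by
      intro p
      rw [hk]
      simp [List.mem_filter, PySem.Set.mem_ofList]
    have h1 : ∀ p ∈ ml, d.contains p = true → p.2 = kdel → ml.count p = 1 := by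
      intro p hp _ hpk
      exact (hpre p hp (hpk ▸ hkin)).1
    have h2 : ∀ p ∈ ml, d.contains p = false → ¬ (kdel < p.2) ∧ p.2 ≠ kdel := by
      intro p hp hc
      have hnk : p ∉ d.keys := by
        intro h
        have hct : d.contains p = true := by
          rw [PySem.Dict.contains_iff_mem_keys]; exact h
        simp [hct] at hc
      have hp2rs : p.2 ∈ rs := by
        by_contra hcon
        exact hnk ((hmemkeys p).mpr ⟨hp, hcon⟩)
      have hp2rcs : p.2 ∈ rcs := by rw [hcat]; exact List.mem_append_left _ hp2rs
      have hpair := (hpre p hp hp2rcs).2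
      rw [hcat] at hpair
      have hcross := (List.pairwise_append.mp hpair).2.2
      have := hcross p.2 hp2rs kdel (by simp) rfl
      exact ⟨by omega, by omega⟩
    obtain ⟨d', hfold, hkeys', hget'⟩ := pv_inner_pass kdel ml d hnd h1 h2
    have hcat' : rcs = (rs ++ [kdel]) ++ todo' := by
      rw [hcat]; simp
    have hk' : d'.keys = (PySem.Set.ofList ml).filter (fun p => !decide (p.2 ∈ rs ++ [kdel])) := by
      rw [hkeys', hk, List.filter_filter]
      apply List.filter_congr
      intro p hp
      have hpm : p ∈ ml := (PySem.Set.mem_ofList ml p).mp hp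
      by_cases h1' : p.2 ∈ rs <;> by_cases h2' : p.2 = kdel <;> simp [h1', h2', hpm]
    have hg' : ∀ q, d'.get? q = if q ∈ ml ∧ q.2 ∉ rs ++ [kdel]
        then some ((ml.count q : Int) * (((rs ++ [kdel]).countP (fun k => decide (k < q.2)) : Nat) : Int))
        else none := by
      intro q
      rw [hget' q, hg q]
      have hcpa : (rs ++ [kdel]).countP (fun k => decide (k < q.2))
          = rs.countP (fun k => decide (k < q.2)) + (if kdel < q.2 then 1 else 0) := by
        rw [List.countP_append]
        by_cases h : kdel < q.2 <;> simp [h]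
      by_cases hqm : q ∈ ml
      · by_cases hqk : q.2 = kdel
        · simp [hqm, hqk]
        · by_cases hlt : kdel < q.2
          · by_cases hqrs : q.2 ∈ rs
            · simp [hqm, hqk, hlt, hqrs]
            · have hnotin : q.2 ∉ rs ++ [kdel] := by simp [hqrs, hqk]
              rw [if_neg (fun h => hqk h.2), if_pos ⟨hqm, hlt⟩, if_pos ⟨hqm, hqrs⟩,
                if_pos ⟨hqm, hnotin⟩, hcpa, if_pos hlt, Option.map_some]
              congr 1
          · have hmm : q.2 ∈ rs ++ [kdel] ↔ q.2 ∈ rs := by simp [hqk]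
            rw [if_neg (by simp [hqk]), if_neg (by simp [hlt]), hcpa, if_neg hlt]
            by_cases hqrs : q.2 ∈ rs
            · rw [if_neg (by simp [hqrs]), if_neg (by simp [hmm, hqrs])]
            · rw [if_pos ⟨hqm, hqrs⟩, if_pos ⟨hqm, by simp [hmm, hqrs]⟩]
              simp
      · simp [hqm]
    obtain ⟨dF, hfoldF, hkF, hgF⟩ := ih (rs ++ [kdel]) d' hcat' hk' hg'
    refine ⟨dF, ?_, hkF, hgF⟩
    simpa [hfold] using hfoldF

-- bisect_left: l[i] < x exactly on the first countP positions of a sorted list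
theorem pv_sorted_char (l : List Int) (hs : l.Pairwise (· ≤ ·)) (x : Int) :
    ∀ i (h : i < l.length), (l[i] < x ↔ i < l.countP (fun y => decide (y < x))) := by
  induction l with
  | nil => simp
  | cons a t ih =>
    rcases List.pairwise_cons.mp hs with ⟨ha, ht⟩
    intro i hi
    by_cases hax : a < x
    · have hcp : (a :: t).countP (fun y => decide (y < x)) = t.countP (fun y => decide (y < x)) + 1 := by
        simp [hax]
      cases i with
      | zero => simpa [hcp] using hax
      | succ j =>
        simp only [List.getElem_cons_succ, hcp]
        rw [ih ht j (by simpa using hi)]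
        omega
    · have h0 : ∀ y ∈ a :: t, ¬ y < x := by
        intro y hy
        rcases List.mem_cons.mp hy with rfl | hy'
        · exact hax
        · exact fun hlt => hax (lt_of_le_of_lt (ha y hy') hlt)
      have hcp : (a :: t).countP (fun y => decide (y < x)) = 0 := by
        rw [List.countP_eq_zero]
        intro y hy
        simpa using h0 y hy
      rw [hcp]
      simp only [Nat.not_lt_zero, iff_false]
      exact h0 _ (List.getElem_mem hi)


theorem pv_bisect_aux (l : List Int) (x : Int) (c : Nat)
    (hchar : ∀ i (h : i < l.length), (l[i] < x ↔ i < c)) (_hc : c ≤ l.length) :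
    ∀ n lo hi, hi - lo ≤ n → lo ≤ c → c ≤ hi → hi ≤ l.length → pvBisectLoop l x lo hi = c := by
  intro n
  induction n with
  | zero =>
    intro lo hi h1 h2 h3 h4
    rw [pvBisectLoop]
    have : ¬ lo < hi := by omega
    simp [this]; omega
  | succ m ih =>
    intro lo hi h1 h2 h3 h4
    rw [pvBisectLoop]
    by_cases hlt : lo < hi
    · have hmid : (lo + hi) / 2 < l.length := by omega
      rw [List.getD_eq_getElem l 0 hmid]
      have hch := hchar _ hmid
      simp only [hlt, dif_pos]
      by_cases hb : l[(lo + hi) / 2] < x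
      · rw [if_pos hb]
        have hmc : (lo + hi) / 2 < c := hch.mp hb
        exact ih ((lo + hi) / 2 + 1) hi (by omega) (by omega) h3 h4
      · rw [if_neg hb]
        have : c ≤ (lo + hi) / 2 := by
          by_contra hcon
          exact hb (hch.mpr (by omega))
        exact ih _ _ (by omega) h2 this (by omega)
    · simp [hlt]; omega


theorem pv_bisect_eq (rcs : List Int) (x : Int) :
    pvBisectLoop (PySem.List.sorted rcs (fun x => x) false) x 0
        (PySem.List.sorted rcs (fun x => x) false).length
      = rcs.countP (fun y => decide (y < x)) := by
  set l := PySem.List.sorted rcs (fun x => x) false with hl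
  have hperm : l.Perm rcs := PySem.List.sorted_perm rcs (fun x => x) false
  have hcp : l.countP (fun y => decide (y < x)) = rcs.countP (fun y => decide (y < x)) :=
    hperm.countP_eq _
  have hs : l.Pairwise (· ≤ ·) := by
    have := PySem.List.sorted_pairwise rcs (fun x => x)
    simpa [hl] using this
  rw [← hcp]
  exact pv_bisect_aux l x _ (pv_sorted_char l hs x) (List.countP_le_length)
    l.length 0 l.length (by omega) (by omega) (List.countP_le_length) le_rfl


-- closed form of A under Pre_: one shifted pair per distinct surviving key, shift = count · countP
theorem pv_A_closed (rcs : List Int) (ml : List (Int × Int))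
    (hpre : Pre_rm_classes_mapping_py rcs ml) :
    rm_classes_mapping_py rcs ml
      = ((PySem.Set.ofList ml).filter (fun p => !decide (p.2 ∈ rcs))).map
          (fun p => (p.1, p.2 - (ml.count p : Int) * (rcs.countP (fun k => decide (k < p.2)) : Int))) := by
  have hk0 : (ml.foldl (fun d p => d.insert p (0 : Int)) PySem.Dict.empty).keys
      = (PySem.Set.ofList ml).filter (fun p => !decide (p.2 ∈ ([] : List Int))) := by
    rw [PySem.Dict.keys_foldl_insert ml (fun _ _ => 0) PySem.Dict.empty]
    simp [PySem.Set.update_nil_left]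
  have hg0 : ∀ q, (ml.foldl (fun d p => d.insert p (0 : Int)) PySem.Dict.empty).get? q
      = if q ∈ ml ∧ q.2 ∉ ([] : List Int)
        then some ((ml.count q : Int) * ((([] : List Int).countP (fun k => decide (k < q.2)) : Nat) : Int))
        else none := by
    intro q
    rw [pv_get?_fromkeys]
    by_cases hq : q ∈ ml <;> simp [hq, PySem.Dict.get?_empty]
  obtain ⟨dF, hfold, hkF, hgF⟩ :=
    pv_outer ml rcs hpre rcs [] (ml.foldl (fun d p => d.insert p (0 : Int)) PySem.Dict.empty)
      (by simp) hk0 hg0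
  have hndF : dF.keys.Nodup := by
    rw [hkF]; exact (PySem.Set.nodup_ofList ml).filter _
  have hA0 : rm_classes_mapping_py rcs ml
      = (match rcs.foldl (fun st k_del => ml.foldl (pvA_inner k_del) st)
            (some (ml.foldl (fun d p => d.insert p (0 : Int)) PySem.Dict.empty)) with
         | none => ([] : List (Int × Int))
         | some d => d.items.map (fun kv => (kv.1.1, kv.1.2 - kv.2))) := rfl
  have hA : rm_classes_mapping_py rcs ml = dF.items.map (fun kv => (kv.1.1, kv.1.2 - kv.2)) := by
    rw [hA0, hfold]
  rw [hA, PySem.Dict.items_eq_map_keys dF hndF 0, List.map_map, hkF]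
  apply List.map_congr_left
  intro p hp
  have hpK : p ∈ ml ∧ p.2 ∉ rcs := by
    have := List.mem_filter.mp hp
    exact ⟨(PySem.Set.mem_ofList ml p).mp this.1, by simpa using this.2⟩
  simp only [Function.comp_apply]
  rw [PySem.Dict.getD_eq_get?_getD, hgF p, if_pos hpK]
  rfl

-- B's seen/append loop: kept pairs are the first occurrences of rest not rejected by r nor seen
theorem pv_B_fold (r : (Int × Int) → Bool) (g : (Int × Int) → Int × Int) :
    ∀ (l : List (Int × Int)) (s : PySem.Set (Int × Int)) (acc : List (Int × Int)),
    (l.foldl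
      (fun (st : PySem.Set (Int × Int) × List (Int × Int)) p =>
        if PySem.Set.contains st.1 p || r p then st
        else (PySem.Set.add st.1 p, st.2 ++ [g p]))
      (s, acc)).2
    = acc ++ (((PySem.List.dedup l).filter (fun p => !PySem.Set.contains s p && !r p)).map g) := by
  intro l
  induction l with
  | nil => intro s acc; simp
  | cons p rest ih =>
    intro s acc
    have hded : PySem.List.dedup (p :: rest) = p :: PySem.Set.discard (PySem.List.dedup rest) p := by
      simp [PySem.Set.ofList_cons]
    by_cases hsp : p ∈ s
    · rw [List.foldl_cons, if_pos (by simp [PySem.Set.contains, hsp]), ih s acc, hded]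
      congr 2
      rw [List.filter_cons_of_neg (by simp [PySem.Set.contains, hsp]), PySem.Set.discard,
        List.filter_filter]
      apply List.filter_congr
      intro y _
      by_cases hyp : y = p
      · subst hyp; simp [PySem.Set.contains, hsp]
      · simp [hyp]
    · by_cases hq : r p = true
      · rw [List.foldl_cons, if_pos (by simp [hq]), ih s acc, hded]
        congr 2
        rw [List.filter_cons_of_neg (by simp [hq]), PySem.Set.discard, List.filter_filter]
        apply List.filter_congr
        intro y _
        by_cases hyp : y = p
        · subst hyp; simp [hq]
        · simp [hyp]
      · rw [List.foldl_cons, if_neg (by simp [PySem.Set.contains, hsp, hq]),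
          ih (PySem.Set.add s p) (acc ++ [g p]), hded,
          List.filter_cons_of_pos (by simp [PySem.Set.contains, hsp, hq]), List.map_cons]
        simp only [List.append_assoc, List.singleton_append]
        congr 3
        rw [PySem.Set.discard, List.filter_filter]
        apply List.filter_congr
        intro y _
        by_cases hyp : y = p
        · subst hyp; simp [PySem.Set.contains, PySem.Set.mem_add]
        · simp [hyp, PySem.Set.contains, PySem.Set.mem_add]

-- closed form of B: same key list as A's, shift = countP (once per key)
theorem pv_B_closed (rcs : List Int) (ml : List (Int × Int)) :
    rm_classes_mapping_py_alt rcs ml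
      = ((PySem.Set.ofList ml).filter (fun p => !decide (p.2 ∈ rcs))).map
          (fun p => (p.1, p.2 - (rcs.countP (fun k => decide (k < p.2)) : Int))) := by
  simp only [rm_classes_mapping_py_alt]
  rw [pv_B_fold (fun p => PySem.Set.contains (PySem.Set.ofList rcs) p.2)
      (fun p => (p.1, p.2 - (pvBisectLoop (PySem.List.sorted rcs (fun x => x) false) p.2 0
        (PySem.List.sorted rcs (fun x => x) false).length : Int)))
      ml PySem.Set.empty []]
  rw [PySem.List.dedup_eq_ofList, List.nil_append]
  have hfc : ∀ p ∈ PySem.Set.ofList ml,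
      (!PySem.Set.contains (PySem.Set.empty : PySem.Set (Int × Int)) p
        && !PySem.Set.contains (PySem.Set.ofList rcs) p.2) = !decide (p.2 ∈ rcs) := by
    intro p _
    simp [PySem.Set.contains, PySem.Set.mem_ofList, PySem.Set.empty]
  rw [List.filter_congr hfc]
  apply List.map_congr_left
  intro p _
  rw [pv_bisect_eq rcs p.2]

-- ===== VERDICT proofs =====
theorem rm_classes_mapping_py_spec : Claim_unchanged_rm_classes_mapping_py := by
  intro rcs ml _hdom hpre
  unfold Spec_rm_classes_mapping_py
  intro hnd
  rw [pv_A_closed rcs ml hpre, pv_B_closed rcs ml]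
  apply List.map_congr_left
  intro p hp
  have hpK : p ∈ ml ∧ p.2 ∉ rcs := by
    have := List.mem_filter.mp hp
    exact ⟨(PySem.Set.mem_ofList ml p).mp this.1, by simpa using this.2⟩
  by_cases hc : ml.count p ≤ 1
  · have h1 : ml.count p = 1 := le_antisymm hc (List.count_pos_iff.mpr hpK.1)
    rw [h1, Nat.cast_one, one_mul]
  · have hlo : rcs.countP (fun k => decide (k < p.2)) = 0 := by
      by_contra hcon
      obtain ⟨k, hk, hklt⟩ := List.countP_pos_iff.mp (Nat.pos_of_ne_zero hcon)
      exact hnd ⟨p, hpK.1, by omega, hpK.2, k, hk, by simpa using hklt⟩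
    rw [hlo, Nat.cast_zero, mul_zero]

theorem rm_classes_mapping_py_changed : Claim_changed_rm_classes_mapping_py := by
  unfold Claim_changed_rm_classes_mapping_py
  refine ⟨by decide, by decide, by decide, by decide, ?_, by decide⟩
  show rm_classes_mapping_py_alt [0] [(1, 5), (1, 5)] = [(1, 4)]
  rw [pv_B_closed]
  decide

theorem rm_classes_mapping_py_tight : Claim_exact_rm_classes_mapping_py := by
  intro rcs ml _hdom hpre hd
  obtain ⟨p, hpm, hcnt, hprs, k, hkrs, hklt⟩ := hd
  intro heq
  rw [pv_A_closed rcs ml hpre, pv_B_closed rcs ml] at heq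
  have hpkeys : p ∈ (PySem.Set.ofList ml).filter (fun p => !decide (p.2 ∈ rcs)) := by
    rw [List.mem_filter]
    exact ⟨(PySem.Set.mem_ofList ml p).mpr hpm, by simpa using hprs⟩
  have hmap := (List.map_inj_left.mp heq) p hpkeys
  have hval : p.2 - (ml.count p : Int) * (rcs.countP (fun k => decide (k < p.2)) : Int)
      = p.2 - (rcs.countP (fun k => decide (k < p.2)) : Int) := congrArg Prod.snd hmap
  have hlo : 0 < rcs.countP (fun k => decide (k < p.2)) :=
    List.countP_pos_iff.mpr ⟨k, hkrs, by simpa using hklt⟩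
  have hm : (2 : Int) ≤ (ml.count p : Int) := by exact_mod_cast hcnt
  have hloZ : (1 : Int) ≤ (rcs.countP (fun k => decide (k < p.2)) : Int) := by exact_mod_cast hlo
  nlinarith
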